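-- pv_equiv track=rewrite | github.com/lilingxi01/temporal-wiki-project | python/ergodiff/postprocess.py | track_changes_without_waypoints
-- ===== SOURCE A (Python) =====
-- def track_changes_without_waypoints(change_pattern: str, target: str):
--     changes = []
--     opened = False
--     curr_start = -1
--
--     for index, character in enumerate(change_pattern):
--         if character == target:
--             if not opened:
--                 opened = True
--                 curr_start = index
--         else:
--             if opened:
--                 opened = False
--                 changes.append((curr_start, index))
--
--     if opened:
--         changes.append((curr_start, len(change_pattern)))
--
--     return changes
-- ===== SOURCE B (Python) =====
-- from itertools import groupby
--
--
-- def track_changes_without_waypoints(change_pattern: str, target: str):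
--     changes = []
--     offset = 0
--     for ch, grp in groupby(change_pattern):
--         length = sum(1 for _ in grp)
--         if ch == target:
--             changes.append((offset, offset + length))
--         offset += length
--     return changes
-- ===== Notes on version B (the rewrite author's own statement) =====
-- stated objective: idiomatic
-- what changed: Replaced the per-character opened/curr_start state machine (with a dangling open-run fixup after the loop) by itertools.groupby over maximal runs of identical characters with a running offset, emitting one interval per matching run.
import Mathlib
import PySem

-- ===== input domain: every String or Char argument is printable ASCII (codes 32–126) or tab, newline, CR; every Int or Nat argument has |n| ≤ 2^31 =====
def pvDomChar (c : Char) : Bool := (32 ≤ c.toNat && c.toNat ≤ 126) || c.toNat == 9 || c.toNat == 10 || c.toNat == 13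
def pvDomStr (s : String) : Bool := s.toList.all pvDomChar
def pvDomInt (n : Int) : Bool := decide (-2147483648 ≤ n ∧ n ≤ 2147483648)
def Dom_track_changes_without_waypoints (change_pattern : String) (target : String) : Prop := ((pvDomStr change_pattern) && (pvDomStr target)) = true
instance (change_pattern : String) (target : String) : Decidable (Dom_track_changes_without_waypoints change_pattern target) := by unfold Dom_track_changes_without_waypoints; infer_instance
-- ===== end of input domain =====

-- B replaces A's opened/curr_start state machine by iterating over maximal runs of
-- identical characters (itertools.groupby) with a running offset (objective: idiomatic).

-- ===== PORT A =====
-- the loop over enumerate(change_pattern) as structural recursion over the characters,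
-- carrying the same state (index, changes, opened, curr_start); branches in source order.
def pvAGo (target : String) : List Char → Int → List (Int × Int) → Bool → Int → List (Int × Int)
  | [], _n, changes, opened, curr_start =>
      -- after the loop, index = len(change_pattern)
      if opened then changes ++ [(curr_start, _n)] else changes
  | c :: rest, n, changes, opened, curr_start =>
      if String.mk [c] == target then
        if !opened then pvAGo target rest (n + 1) changes true n
        else pvAGo target rest (n + 1) changes opened curr_start
      else
        if opened then pvAGo target rest (n + 1) (changes ++ [(curr_start, n)]) false curr_start
        else pvAGo target rest (n + 1) changes opened curr_start

def track_changes_without_waypoints (change_pattern : String) (target : String) : List (Int × Int) :=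
  pvAGo target change_pattern.toList 0 [] false (-1)

-- ===== PORT B =====
-- groupby: each step consumes one maximal run of identical characters, emits the
-- interval if the run's character equals target, and advances the offset by its length.
def pvBGo (target : String) : List Char → Int → List (Int × Int)
  | [], _ => []
  | c :: rest, offset =>
      let len : Int := 1 + (rest.takeWhile (· == c)).length
      (if String.mk [c] == target then [(offset, offset + len)] else []) ++
        pvBGo target (rest.dropWhile (· == c)) (offset + len)
  termination_by l => l.length
  decreasing_by
    simpa using Nat.lt_succ_of_le (List.length_dropWhile_le (· == c) rest)

def track_changes_without_waypoints_alt (change_pattern : String) (target : String) : List (Int × Int) :=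
  pvBGo target change_pattern.toList 0

-- ===== PRECONDITION & SPEC =====
def Spec_track_changes_without_waypoints (change_pattern : String) (target : String) (out : List (Int × Int)) : Prop := out = track_changes_without_waypoints_alt change_pattern target
instance (change_pattern : String) (target : String) (out : List (Int × Int)) : Decidable (Spec_track_changes_without_waypoints change_pattern target out) := by unfold Spec_track_changes_without_waypoints; infer_instance

-- ===== CLAIM (what is proved, stated in full; the proofs are below) =====
def Claim_equal_track_changes_without_waypoints : Prop := ∀ (change_pattern : String) (target : String), Dom_track_changes_without_waypoints change_pattern target → Spec_track_changes_without_waypoints change_pattern target (track_changes_without_waypoints change_pattern target)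

-- ===== LEMMAS AND PROOFS =====

-- a character d matches target iff d equals the (matching) character c
theorem pv_match_iff {c d : Char} {t : String} (h : (String.mk [c] == t) = true) :
    (String.mk [d] == t) = (d == c) := by
  have hc : t = String.mk [c] := ((beq_iff_eq).mp h).symm
  subst hc
  by_cases hdc : d = c
  · simp [hdc]
  · have : ¬ String.mk [d] = String.mk [c] := by
      intro he
      have hdl : (String.mk [d]).toList = [d] := Eq.symm (String.ofList_eq.mp rfl)
      have hcl : (String.mk [c]).toList = [c] := Eq.symm (String.ofList_eq.mp rfl)
      have := congrArg String.toList he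
      rw [hdl, hcl] at this
      exact hdc (by simpa using this)
    simp [hdc, this]

-- while opened, A consumes the run of matching characters and closes the interval
theorem pvAGo_open (t : String) (c : Char) (hc : (String.mk [c] == t) = true) :
    ∀ (l : List Char) (n s : Int) (acc : List (Int × Int)),
      pvAGo t l n acc true s =
        pvAGo t (l.dropWhile (· == c))
          (n + (l.takeWhile (· == c)).length)
          (acc ++ [(s, n + (l.takeWhile (· == c)).length)]) false s := by
  intro l
  induction l with
  | nil => intro n s acc; simp [pvAGo]
  | cons d rest ih =>
      intro n s acc
      by_cases hdc : d = c
      · subst hdc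
        have hstep : pvAGo t (d :: rest) n acc true s = pvAGo t rest (n + 1) acc true s := by
          simp [pvAGo, hc]
        rw [hstep, ih]
        have harith : (n + 1) + ((rest.takeWhile (· == d)).length : Int)
            = n + (((d :: rest).takeWhile (· == d)).length : Int) := by
          simp only [List.takeWhile_cons, beq_self_eq_true, if_true, List.length_cons]
          push_cast; ring
        rw [harith]
        simp
      · have hdc' : (d == c) = false := by simp [hdc]
        have hd : (String.mk [d] == t) = false := by rw [pv_match_iff hc]; exact hdc'
        simp [pvAGo, hd, hdc']

-- while closed, A skips a run of non-matching characters one by one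
theorem pvAGo_skip (t : String) :
    ∀ (r : List Char), (∀ d ∈ r, (String.mk [d] == t) = false) →
      ∀ (rest : List Char) (n s : Int) (acc : List (Int × Int)),
        pvAGo t (r ++ rest) n acc false s = pvAGo t rest (n + r.length) acc false s := by
  intro r
  induction r with
  | nil => intro _ rest n s acc; simp
  | cons d r' ih =>
      intro h rest n s acc
      have hd := h d (by simp)
      simp only [List.cons_append, pvAGo, hd, Bool.false_eq_true, if_false]
      rw [ih (fun e he => h e (by simp [he]))]
      congr 1
      push_cast [List.length_cons]; ring

-- main invariant: from the closed state, A's loop produces acc ++ (B's runs output)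
theorem pv_main_aux (t : String) :
    ∀ (k : Nat) (l : List Char), l.length ≤ k → ∀ (n s : Int) (acc : List (Int × Int)),
      pvAGo t l n acc false s = acc ++ pvBGo t l n := by
  intro k
  induction k with
  | zero =>
      intro l hl n s acc
      have : l = [] := List.length_eq_zero_iff.mp (Nat.le_zero.mp hl)
      subst this; simp [pvAGo, pvBGo]
  | succ k ih =>
      intro l hl n s acc
      match l with
      | [] => simp [pvAGo, pvBGo]
      | c :: rest =>
        have hrest : rest.length ≤ k := Nat.succ_le_succ_iff.mp hl
        have hdrop : (rest.dropWhile (· == c)).length ≤ k :=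
          le_trans (List.length_dropWhile_le (· == c) rest) hrest
        by_cases hc : (String.mk [c] == t) = true
        · simp only [pvAGo, hc, if_pos, Bool.not_false]
          rw [pvAGo_open t c hc, ih _ hdrop, pvBGo]
          simp only [hc, if_pos]
          have harith : (n + 1) + ((rest.takeWhile (· == c)).length : Int)
              = n + (1 + ((rest.takeWhile (· == c)).length : Int)) := by ring
          rw [harith]
          simp [List.append_assoc]
        · have hcf : (String.mk [c] == t) = false := by simpa using hc
          have hall : ∀ d ∈ rest.takeWhile (· == c), (String.mk [d] == t) = false := by
            intro d hd
            have hdc : d = c := by simpa using List.mem_takeWhile_imp hd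
            rw [hdc]; exact hcf
          simp only [pvAGo, hcf, Bool.false_eq_true, if_false]
          have hsplit : rest = rest.takeWhile (· == c) ++ rest.dropWhile (· == c) :=
            (List.takeWhile_append_dropWhile).symm
          conv_lhs => rw [hsplit]
          rw [pvAGo_skip t _ hall, ih _ hdrop, pvBGo]
          simp only [hcf, Bool.false_eq_true, if_false, List.nil_append]
          have harith : (n + 1) + ((rest.takeWhile (· == c)).length : Int)
              = n + (1 + ((rest.takeWhile (· == c)).length : Int)) := by ring
          rw [harith]

theorem pv_main (t : String) (l : List Char) (n s : Int) (acc : List (Int × Int)) :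
    pvAGo t l n acc false s = acc ++ pvBGo t l n :=
  pv_main_aux t l.length l (le_refl _) n s acc

-- ===== VERDICT (by name: the statement is the Claim_ definition above) =====
theorem track_changes_without_waypoints_spec : Claim_equal_track_changes_without_waypoints := by
  intro cp t _
  unfold Spec_track_changes_without_waypoints track_changes_without_waypoints track_changes_without_waypoints_alt
  simpa using pv_main t cp.toList 0 (-1) []
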